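-- pv_equiv track=rewrite | github.com/bogdantudose14/Advent-of-code-2019 | day3/main.py | condition1
-- ===== SOURCE A (Python) =====
-- def condition1(list_of_ints):
--     ok1 = False
--     frequence = [0] * 10
--     for index in range(0, len(list_of_ints) - 1):
--         if list_of_ints[index] == list_of_ints[index + 1]:
--             # ok1=True;
--             # break
--             frequence[list_of_ints[index]] += 1
--
--     # return ok1
--     if 1 in frequence:
--         return True
--     else:
--         return False
-- ===== SOURCE B (Python) =====
-- def condition1(list_of_ints):
--     # Run-length decomposition: a maximal run of length L contributes L-1
--     # adjacent-duplicate pairs for its value; accumulate per value across runs.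
--     counts = {}
--     run_val = None
--     run_len = 0
--     for v in list_of_ints:
--         if run_val is not None and v == run_val:
--             run_len += 1
--         else:
--             if run_len >= 2:
--                 counts[run_val] = counts.get(run_val, 0) + run_len - 1
--             run_val = v
--             run_len = 1
--     if run_len >= 2:
--         counts[run_val] = counts.get(run_val, 0) + run_len - 1
--     return any(c == 1 for c in counts.values())
-- ===== Notes on version B (the rewrite author's own statement) =====
-- stated objective: alternative
-- what changed: B replaces A's index loop over adjacent pairs with a fixed 10-slot frequency array by a single run-length pass that groups maximal runs and accumulates (run length - 1) per value in a dict, then tests whether any per-value total equals 1; this also works for arbitrary integers, not only digits 0-9.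
-- outside the precondition, e.g. on condition1([9, 9, -1, -1]): A returns False, B returns True; on condition1([-1, -1]): A returns True, B returns True
import Mathlib
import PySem

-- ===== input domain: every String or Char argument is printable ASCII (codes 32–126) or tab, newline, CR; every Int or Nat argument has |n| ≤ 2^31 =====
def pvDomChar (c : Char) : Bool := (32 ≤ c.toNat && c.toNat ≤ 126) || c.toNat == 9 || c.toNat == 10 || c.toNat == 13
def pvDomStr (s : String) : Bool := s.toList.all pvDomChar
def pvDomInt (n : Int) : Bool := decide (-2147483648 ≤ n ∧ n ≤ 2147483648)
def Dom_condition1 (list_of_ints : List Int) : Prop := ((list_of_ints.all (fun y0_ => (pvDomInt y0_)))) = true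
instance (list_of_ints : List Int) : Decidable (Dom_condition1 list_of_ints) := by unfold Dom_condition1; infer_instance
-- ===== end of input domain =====

-- B replaces A's adjacent-pair index loop over a fixed 10-slot frequency array by a single
-- run-length pass accumulating (run length - 1) per value in a dict; same results on digit
-- duplicates (Pre_), and B also returns sensibly where A's array indexing raises or wraps.

-- ===== PORT A =====
def condition1 (list_of_ints : List Int) : Bool :=
  let frequence : List Int := List.replicate 10 0
  let frequence :=
    (PySem.List.pyRange 0 ((list_of_ints.length : Int) - 1) 1).foldl
      (fun f index =>
        if PySem.List.pyGetD list_of_ints index 0 =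
            PySem.List.pyGetD list_of_ints (index + 1) 0 then
          PySem.List.pySetD f (PySem.List.pyGetD list_of_ints index 0)
            (PySem.List.pyGetD f (PySem.List.pyGetD list_of_ints index 0) 0 + 1)
        else f)
      frequence
  frequence.contains 1

-- ===== PORT B =====
-- loop body of Source B's single run-length pass (state: counts dict, current run value, run length)
def bStep (st : PySem.Dict Int Int × Option Int × Int) (v : Int) :
    PySem.Dict Int Int × Option Int × Int :=
  match st with
  | (counts, runVal, runLen) =>
    if runVal = some v then (counts, runVal, runLen + 1)
    else
      ((if 2 ≤ runLen then
          match runVal with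
          | some rv => counts.insert rv (counts.getD rv 0 + runLen - 1)
          | none => counts
        else counts), some v, 1)

-- the trailing 'if run_len >= 2' flush after the loop
def bFlush (st : PySem.Dict Int Int × Option Int × Int) : PySem.Dict Int Int :=
  match st with
  | (counts, runVal, runLen) =>
    if 2 ≤ runLen then
      match runVal with
      | some rv => counts.insert rv (counts.getD rv 0 + runLen - 1)
      | none => counts
    else counts

def condition1_alt (list_of_ints : List Int) : Bool :=
  (bFlush (list_of_ints.foldl bStep (PySem.Dict.empty, none, 0))).values.any (· == 1)

-- ===== PRECONDITION & SPEC =====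
-- Pre_ excludes lists with an adjacent equal pair whose value lies outside 0..9: for values
-- >= 10 or <= -11 A raises IndexError on 'frequence[value] += 1', and for -10..-1 A returns a
-- value via Python's negative-index wraparound, silently merging that value's count with the
-- count of digit value+10.
def Pre_condition1 (list_of_ints : List Int) : Prop :=
  ∀ p ∈ list_of_ints.zip list_of_ints.tail, p.1 = p.2 → 0 ≤ p.1 ∧ p.1 ≤ 9
instance (list_of_ints : List Int) : Decidable (Pre_condition1 list_of_ints) := by
  unfold Pre_condition1; infer_instance

def pvWitness_condition1 : List Int := [1, 1, 3, 4, 4, 4]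

def Spec_condition1 (list_of_ints : List Int) (out : Bool) : Prop := out = condition1_alt list_of_ints
instance (list_of_ints : List Int) (out : Bool) : Decidable (Spec_condition1 list_of_ints out) := by
  unfold Spec_condition1; infer_instance

-- ===== CLAIM (what is proved, stated in full; the proofs are below) =====
def Claim_equal_condition1 : Prop := ∀ (list_of_ints : List Int), Dom_condition1 list_of_ints → Pre_condition1 list_of_ints → Spec_condition1 list_of_ints (condition1 list_of_ints)

-- ===== LEMMAS AND PROOFS =====

-- number of adjacent equal pairs of value v
def adjCnt (l : List Int) (v : Int) : Nat :=
  (l.zip l.tail).countP (fun p => p.1 == p.2 && p.1 == v)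

theorem foldl_idx_pairs {β : Type} (h : β → Int → Int → β) :
    ∀ (l : List Int) (b : β),
      (List.range (l.length - 1)).foldl (fun acc i => h acc (l.getD i 0) (l.getD (i+1) 0)) b
        = (l.zip l.tail).foldl (fun acc p => h acc p.1 p.2) b := by
  intro l
  induction l with
  | nil => intro b; simp
  | cons a t ih =>
    intro b
    cases t with
    | nil => simp
    | cons c t' =>
      simp only [List.length_cons, Nat.add_sub_cancel, List.range_succ_eq_map,
        List.foldl_cons, List.foldl_map, List.zip_cons_cons, List.tail_cons,
        Nat.succ_eq_add_one, List.getD_cons_succ, List.getD_cons_zero]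
      have := ih (b := h b a c)
      simp only [List.length_cons, Nat.add_sub_cancel, List.tail_cons] at this
      exact this



theorem aFold (ps : List (Int × Int)) :
    ∀ (f : List Int), f.length = 10 →
      (∀ p ∈ ps, p.1 = p.2 → 0 ≤ p.1 ∧ p.1 ≤ 9) →
      (ps.foldl (fun acc p =>
          if p.1 = p.2 then
            PySem.List.pySetD acc p.1 (PySem.List.pyGetD acc p.1 0 + 1)
          else acc) f).length = 10 ∧
      ∀ k : Nat, k < 10 →
        (ps.foldl (fun acc p =>
          if p.1 = p.2 then
            PySem.List.pySetD acc p.1 (PySem.List.pyGetD acc p.1 0 + 1)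
          else acc) f).getD k 0
          = f.getD k 0 + (ps.countP (fun p => p.1 == p.2 && p.1 == (k : Int)) : Int) := by
  induction ps with
  | nil => intro f hf _; exact ⟨hf, fun k _ => by simp⟩
  | cons p ps ih =>
    intro f hf hb
    have hps := fun q hq => hb q (List.mem_cons_of_mem _ hq)
    by_cases hpq : p.1 = p.2
    · obtain ⟨h0, h9⟩ := hb p (List.mem_cons_self ..) hpq
      have hlt : p.1.toNat < f.length := by omega
      have hset : PySem.List.pySetD f p.1 (PySem.List.pyGetD f p.1 0 + 1)
          = f.set p.1.toNat (f.getD p.1.toNat 0 + 1) := by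
        rw [PySem.List.pySetD_of_nonneg f _ h0,
          PySem.List.pyGetD_eq_getElem f 0 h0 (by omega),
          List.getD_eq_getElem f 0 hlt]
      simp only [List.foldl_cons, if_pos hpq, hset]
      obtain ⟨hlen, hval⟩ := ih (f.set p.1.toNat (f.getD p.1.toNat 0 + 1))
        (by rw [List.length_set]; exact hf) hps
      refine ⟨hlen, fun k hk => ?_⟩
      rw [hval k hk, List.countP_cons]
      by_cases hkv : p.1.toNat = k
      · have hpk : p.1 = (k : Int) := by omega
        have hpred : (p.1 == p.2 && p.1 == (k : Int)) = true := by
          rw [Bool.and_eq_true, beq_iff_eq, beq_iff_eq]; exact ⟨hpq, hpk⟩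
        rw [hpred]
        have hgd : (f.set p.1.toNat (f.getD p.1.toNat 0 + 1)).getD k 0 = f.getD k 0 + 1 := by
          subst hkv
          rw [List.getD_eq_getElem _ _ (by rw [List.length_set]; exact hlt),
            List.getElem_set_self, List.getD_eq_getElem f 0 hlt]
        rw [hgd]; simp only [if_true]; push_cast; ring
      · have hpred : (p.1 == p.2 && p.1 == (k : Int)) = false := by
          simp only [Bool.and_eq_false_iff, beq_eq_false_iff_ne, ne_eq]
          right; intro hc; exact hkv (by omega)
        rw [hpred]
        have hklt : k < f.length := by omega
        have hgd : (f.set p.1.toNat (f.getD p.1.toNat 0 + 1)).getD k 0 = f.getD k 0 := by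
          rw [List.getD_eq_getElem _ _ (by rw [List.length_set]; exact hklt),
            List.getElem_set_ne hkv, List.getD_eq_getElem f 0 hklt]
        rw [hgd]; simp
    · simp only [List.foldl_cons, if_neg hpq]
      obtain ⟨hlen, hval⟩ := ih f hf hps
      refine ⟨hlen, fun k hk => ?_⟩
      rw [hval k hk, List.countP_cons]
      have hpred : (p.1 == p.2 && p.1 == (k : Int)) = false := by simp [hpq]
      rw [hpred]; simp


theorem adjCnt_cons2 (a b : Int) (t : List Int) (v : Int) :
    adjCnt (a :: b :: t) v = adjCnt (b :: t) v + (if a = b ∧ a = v then 1 else 0) := by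
  unfold adjCnt
  simp only [List.zip_cons_cons, List.tail_cons, List.countP_cons]
  congr 1
  by_cases h : a = b ∧ a = v
  · simp [h.1]
  · rcases not_and_or.mp h with h' | h' <;> simp [h']


theorem adjCnt_replicate (m : Nat) (x v : Int) :
    adjCnt (List.replicate m x) v = if v = x then m - 1 else 0 := by
  induction m with
  | zero => simp [adjCnt]
  | succ n ih =>
    cases n with
    | zero => simp [adjCnt]
    | succ n' =>
      rw [List.replicate_succ, List.replicate_succ, adjCnt_cons2,
        ← List.replicate_succ, ih]
      by_cases h : v = x
      · subst h; simp
      · have hx : ¬ (x = v) := fun hc => h hc.symm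
        simp [h, hx]


theorem adjCnt_replicate_append (m : Nat) (hm : 1 ≤ m) (x y : Int) (t : List Int)
    (hxy : x ≠ y) (v : Int) :
    adjCnt (List.replicate m x ++ y :: t) v
      = (if v = x then m - 1 else 0) + adjCnt (y :: t) v := by
  induction m with
  | zero => omega
  | succ n ih =>
    cases n with
    | zero =>
      have : ¬ (x = y ∧ x = v) := fun h => hxy h.1
      simp [List.replicate_one, adjCnt_cons2, this]
    | succ n' =>
      have h2 : List.replicate (n' + 1 + 1) x ++ y :: t
          = x :: (List.replicate (n' + 1) x ++ y :: t) := by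
        rw [List.replicate_succ]; rfl
      have h3 : List.replicate (n' + 1) x ++ y :: t
          = x :: (List.replicate n' x ++ y :: t) := by
        rw [List.replicate_succ]; rfl
      rw [h2, h3, adjCnt_cons2, ← h3, ih (by omega)]
      by_cases h : v = x
      · subst h; simp; omega
      · have hx : ¬ (x = v) := fun hc => h hc.symm
        simp [h, hx]


theorem bFold (rest : List Int) :
    ∀ (c : PySem.Dict Int Int) (rv rl : Int), 1 ≤ rl → c.keys.Nodup →
      (bFlush (rest.foldl bStep (c, some rv, rl))).keys.Nodup ∧
      (∀ v : Int, (bFlush (rest.foldl bStep (c, some rv, rl))).getD v 0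
          = c.getD v 0 + (adjCnt (List.replicate rl.toNat rv ++ rest) v : Int)) ∧
      (∀ v : Int, v ∈ (bFlush (rest.foldl bStep (c, some rv, rl))).keys ↔
          v ∈ c.keys ∨ adjCnt (List.replicate rl.toNat rv ++ rest) v ≠ 0) := by
  induction rest with
  | nil =>
    intro c rv rl hrl hnd
    simp only [List.foldl_nil, List.append_nil]
    unfold bFlush
    by_cases h2 : 2 ≤ rl
    · simp only [if_pos h2]
      refine ⟨PySem.Dict.nodup_keys_insert _ _ _ hnd, fun v => ?_, fun v => ?_⟩
      · rw [PySem.Dict.getD_insert, adjCnt_replicate]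
        split_ifs with hv
        · subst hv; omega
        · simp
      · rw [PySem.Dict.mem_keys_insert, adjCnt_replicate]
        split_ifs with hv
        · subst hv
          constructor
          · intro _; right; omega
          · intro _; left; rfl
        · simp [hv]
    · simp only [if_neg h2]
      have hrl1 : rl = 1 := by omega
      subst hrl1
      refine ⟨hnd, fun v => ?_, fun v => ?_⟩
      · rw [adjCnt_replicate]
        split_ifs <;> simp
      · rw [adjCnt_replicate]
        split_ifs <;> simp
  | cons x rest' ih =>
    intro c rv rl hrl hnd
    simp only [List.foldl_cons]
    by_cases hx : rv = x
    · subst hx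
      have hstep : bStep (c, some rv, rl) rv = (c, some rv, rl + 1) := by
        unfold bStep; simp
      rw [hstep]
      obtain ⟨hnd2, hval, hkeys⟩ := ih c rv (rl + 1) (by omega) hnd
      have hlist : List.replicate (rl + 1).toNat rv ++ rest'
          = List.replicate rl.toNat rv ++ rv :: rest' := by
        have h1 : (rl + 1).toNat = rl.toNat + 1 := by omega
        rw [h1, List.replicate_succ', List.append_assoc]; rfl
      rw [hlist] at hval hkeys
      exact ⟨hnd2, hval, hkeys⟩
    · have hstep : bStep (c, some rv, rl) x
          = ((if 2 ≤ rl then c.insert rv (c.getD rv 0 + rl - 1) else c), some x, 1) := by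
        unfold bStep
        have hne : ¬ (some rv = some x) := by simpa using hx
        simp [hne]
      rw [hstep]
      set c2 := (if 2 ≤ rl then c.insert rv (c.getD rv 0 + rl - 1) else c) with hc2
      have hnd2 : c2.keys.Nodup := by
        rw [hc2]; split_ifs
        · exact PySem.Dict.nodup_keys_insert _ _ _ hnd
        · exact hnd
      obtain ⟨hndr, hval, hkeys⟩ := ih c2 x 1 (by omega) hnd2
      have hone : List.replicate (1:Int).toNat x ++ rest' = x :: rest' := by
        simp [List.replicate_one]
      rw [hone] at hval hkeys
      have hsplit : ∀ v : Int, adjCnt (List.replicate rl.toNat rv ++ x :: rest') v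
          = (if v = rv then rl.toNat - 1 else 0) + adjCnt (x :: rest') v :=
        fun v => adjCnt_replicate_append rl.toNat (by omega) rv x rest' hx v
      have hcval : ∀ v : Int, c2.getD v 0
          = c.getD v 0 + (if 2 ≤ rl ∧ v = rv then rl - 1 else 0) := by
        intro v
        rw [hc2]; split_ifs with h2 hv hv
        · rw [PySem.Dict.getD_insert, if_pos hv.2]
          rw [hv.2]; ring
        · rw [PySem.Dict.getD_insert, if_neg (by tauto)]; ring
        · omega
        · ring
      have hckeys : ∀ v : Int, v ∈ c2.keys ↔ v ∈ c.keys ∨ (2 ≤ rl ∧ v = rv) := by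
        intro v
        rw [hc2]; split_ifs with h2
        · rw [PySem.Dict.mem_keys_insert]; tauto
        · tauto
      refine ⟨hndr, fun v => ?_, fun v => ?_⟩
      · rw [hval v, hcval v, hsplit v]
        split_ifs with hv1 hv2 <;> try omega
      · rw [hkeys v, hckeys v, hsplit v]
        split_ifs with hv
        · constructor
          · rintro ((h | ⟨h2, _⟩) | h)
            · exact Or.inl h
            · right; omega
            · right; omega
          · rintro (h | h)
            · exact Or.inl (Or.inl h)
            · by_cases ha : adjCnt (x :: rest') v = 0
              · left; right; exact ⟨by omega, hv⟩
              · right; omega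
        · constructor
          · rintro ((h | ⟨_, h⟩) | h)
            · exact Or.inl h
            · exact absurd h hv
            · right; omega
          · rintro (h | h)
            · exact Or.inl (Or.inl h)
            · right; omega


theorem condition1_charA (l : List Int) (h : Pre_condition1 l) :
    condition1 l = true ↔ ∃ k : Nat, k < 10 ∧ adjCnt l (k : Int) = 1 := by
  unfold condition1
  rw [PySem.List.pyRange_one]
  simp only [List.foldl_map, sub_zero, zero_add, PySem.List.pyGetD_natCast]
  have hcast : ∀ (k : Nat), ((k : Int) + 1) = ((k + 1 : Nat) : Int) := by intro k; push_cast; ring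
  have hbody : ∀ (acc : List Int) (k : Nat),
      (if l.getD k 0 = PySem.List.pyGetD l ((k : Int) + 1) 0 then
        PySem.List.pySetD acc (l.getD k 0) (PySem.List.pyGetD acc (l.getD k 0) 0 + 1)
      else acc)
      = (fun (accf : List Int) (a b : Int) =>
          if a = b then PySem.List.pySetD accf a (PySem.List.pyGetD accf a 0 + 1) else accf)
          acc (l.getD k 0) (l.getD (k+1) 0) := by
    intro acc k
    rw [hcast k, PySem.List.pyGetD_natCast]
  have htn : (((l.length : Int) - 1)).toNat = l.length - 1 := by omega
  rw [htn]
  have := foldl_idx_pairs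
    (fun (accf : List Int) (a b : Int) =>
      if a = b then PySem.List.pySetD accf a (PySem.List.pyGetD accf a 0 + 1) else accf)
    l (List.replicate 10 0)
  rw [show (fun (f : List Int) (k : Nat) =>
      if l.getD k 0 = PySem.List.pyGetD l ((k : Int) + 1) 0 then
        PySem.List.pySetD f (l.getD k 0) (PySem.List.pyGetD f (l.getD k 0) 0 + 1)
      else f)
    = (fun (accf : List Int) (k : Nat) =>
        (fun (accf : List Int) (a b : Int) =>
          if a = b then PySem.List.pySetD accf a (PySem.List.pyGetD accf a 0 + 1) else accf)
          accf (l.getD k 0) (l.getD (k+1) 0)) from funext₂ hbody, this]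
  have hrep : ∀ i : Nat, (List.replicate 10 (0:Int)).getD i 0 = 0 := by
    intro i
    rw [List.getD_eq_getElem?_getD, List.getElem?_replicate]
    split_ifs <;> simp
  obtain ⟨hlen, hval⟩ := aFold (l.zip l.tail) (List.replicate 10 0) (by simp) h
  rw [List.contains_iff_mem]
  constructor
  · intro hmem
    obtain ⟨i, hi, hei⟩ := List.mem_iff_getElem.mp hmem
    refine ⟨i, by omega, ?_⟩
    have := hval i (by omega)
    rw [List.getD_eq_getElem _ _ hi, hei, hrep i] at this
    unfold adjCnt
    omega
  · rintro ⟨k, hk, hcnt⟩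
    have := hval k hk
    unfold adjCnt at hcnt
    rw [hcnt, hrep k] at this
    rw [List.mem_iff_getElem]
    exact ⟨k, by omega, by rw [← List.getD_eq_getElem _ 0 (by omega), this]; simp⟩


theorem condition1_charB (l : List Int) :
    condition1_alt l = true ↔ ∃ v : Int, adjCnt l v = 1 := by
  cases l with
  | nil =>
    rw [show condition1_alt [] = false from rfl]
    simp [adjCnt]
  | cons x t =>
    unfold condition1_alt
    have hstep : List.foldl bStep (PySem.Dict.empty, none, 0) (x :: t)
        = List.foldl bStep (PySem.Dict.empty, some x, 1) t := by
      simp only [List.foldl_cons]; rfl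
    rw [hstep]
    obtain ⟨hnd, hval, hkeys⟩ := bFold t PySem.Dict.empty x 1 (by omega)
      (by rw [PySem.Dict.keys_empty]; exact List.nodup_nil)
    have hone : List.replicate (1:Int).toNat x ++ t = x :: t := by
      simp [List.replicate_one]
    rw [hone] at hval hkeys
    rw [PySem.Dict.values_eq_map_keys _ hnd 0, List.any_map, List.any_eq_true]
    constructor
    · rintro ⟨k, hk, hbeq⟩
      refine ⟨k, ?_⟩
      have := hval k
      rw [PySem.Dict.getD_empty] at this
      simp only [Function.comp_apply, beq_iff_eq] at hbeq
      omega
    · rintro ⟨v, hv⟩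
      refine ⟨v, ?_, ?_⟩
      · rw [hkeys v]
        right; omega
      · have := hval v
        rw [PySem.Dict.getD_empty] at this
        simp only [Function.comp_apply, beq_iff_eq]
        omega

-- ===== VERDICT (by name: the statement is the Claim_ definition above) =====
theorem condition1_spec : Claim_equal_condition1 := by
  intro l _ hpre
  unfold Spec_condition1
  rw [Bool.eq_iff_iff, condition1_charA l hpre, condition1_charB l]
  constructor
  · rintro ⟨k, _, hk⟩; exact ⟨(k : Int), hk⟩
  · rintro ⟨v, hv⟩
    have hne : adjCnt l v ≠ 0 := by omega
    have := List.countP_eq_zero (p := fun p : Int × Int => p.1 == p.2 && p.1 == v)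
      (l := l.zip l.tail)
    obtain ⟨p, hp, hpp⟩ : ∃ p ∈ l.zip l.tail, (p.1 == p.2 && p.1 == v) = true := by
      by_contra hc
      push Not at hc
      exact hne (this.mpr (by simpa using hc))
    simp only [Bool.and_eq_true, beq_iff_eq] at hpp
    obtain ⟨h12, h1v⟩ := hpp
    obtain ⟨h0, h9⟩ := hpre p hp h12
    have hv0 : (0:Int) ≤ v := h1v ▸ h0
    refine ⟨v.toNat, by omega, ?_⟩
    rwa [Int.toNat_of_nonneg hv0]
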